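-- pv_equiv track=rewrite | github.com/heartlocket/tgbots | main.py | select_strings
-- ===== SOURCE A (Python) =====
-- def select_strings(array):
--     selected_strings = []
--     total_character_count = 0
--
--     # Start from the end of the original array
--     for string in reversed(array):
--         # Calculate the character count of the current string
--         string_length = len(string)
--
--         # Check if adding this string exceeds the character limit
--         if total_character_count + string_length <= 4000:
--             # Append the string to the selected_strings array
--             selected_strings.append(string)
--             total_character_count += string_length
--         else:
--             # If adding this string exceeds the limit, stop the loop
--             break
--
--     # Reverse the selected_strings array to get the correct order
--     selected_strings.reverse()
--
--     return selected_strings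
-- ===== SOURCE B (Python) =====
-- def select_strings(array):
--     # The answer is always the longest suffix whose total length is <= 4000
--     # (lengths are nonnegative, so suffix sums only shrink as the start moves
--     # right). Compute the grand total once, then scan FORWARD for the first
--     # index whose prefix sum reaches total - 4000, and slice there.
--     need = sum(map(len, array)) - 4000
--     prefix = 0
--     k = 0
--     while prefix < need:
--         prefix += len(array[k])
--         k += 1
--     return array[k:]
-- ===== Notes on version B (the rewrite author's own statement) =====
-- stated objective: alternative
-- what changed: Instead of A's backward greedy that appends fitting strings to a list and reverses it, B computes the grand total of lengths once and scans FORWARD for the first index whose prefix sum reaches total-4000 (correct because suffix sums are antitone), returning one slice.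
import Mathlib
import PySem

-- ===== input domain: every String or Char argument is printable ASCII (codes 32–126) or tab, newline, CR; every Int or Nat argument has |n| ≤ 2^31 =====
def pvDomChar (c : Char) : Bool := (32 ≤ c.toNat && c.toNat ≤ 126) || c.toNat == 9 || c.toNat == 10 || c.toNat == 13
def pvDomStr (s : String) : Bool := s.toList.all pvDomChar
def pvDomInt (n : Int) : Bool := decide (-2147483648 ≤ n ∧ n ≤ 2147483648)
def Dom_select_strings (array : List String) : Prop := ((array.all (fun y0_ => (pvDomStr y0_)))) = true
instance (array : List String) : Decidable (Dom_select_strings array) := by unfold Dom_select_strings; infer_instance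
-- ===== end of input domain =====

-- B replaces A's backward greedy (append + reverse) by a forward prefix-sum scan to the
-- threshold total-4000 and a single slice (alternative algorithm, same cost).

-- ===== PORT A =====
-- loop over reversed(array); sel is selected_strings (built by append), tot the character count;
-- the final 'selected_strings.reverse()' is the '.reverse' at each exit point.
def selLoopA : List String → Nat → List String → List String
  | [], _, sel => sel.reverse
  | s :: rest, tot, sel =>
    if tot + s.toList.length ≤ 4000 then
      selLoopA rest (tot + s.toList.length) (sel ++ [s])
    else sel.reverse

def select_strings (array : List String) : List String :=
  selLoopA array.reverse 0 []

-- ===== PORT B =====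
-- Source B's 'while prefix < need' loop; the list argument is the suffix array[k:], so
-- array[k] is its head (always in range where Python reads it: when the suffix is
-- empty, prefix equals the grand total ≥ need, so the condition is false).
def fwdLoopB (need : Int) : List String → Int → Nat → Nat
  | rest, pfx, k =>
    if pfx < need then
      match rest with
      | [] => k
      | s :: r => fwdLoopB need r (pfx + s.toList.length) (k + 1)
    else k

-- need = sum(map(len, array)) - 4000; return array[k:] (one slice = List.drop)
def select_strings_alt (array : List String) : List String :=
  array.drop (fwdLoopB ((((array.map (fun s => s.toList.length)).sum : Nat) : Int) - 4000) array 0 0)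

-- ===== PRECONDITION & SPEC =====
def Spec_select_strings (array : List String) (out : List String) : Prop := out = select_strings_alt array
instance (array : List String) (out : List String) : Decidable (Spec_select_strings array out) := by unfold Spec_select_strings; infer_instance

-- ===== CLAIM (what is proved, stated in full; the proofs are below) =====
def Claim_equal_select_strings : Prop := ∀ (array : List String), Dom_select_strings array → Spec_select_strings array (select_strings array)

-- ===== LEMMAS AND PROOFS =====

-- sum of the lengths of the suffix array[k:]
def susum (array : List String) (k : Nat) : Nat :=
  ((array.drop k).map (fun s => s.toList.length)).sum

theorem susum_eq (array : List String) (k : Nat) :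
    susum array k = ((array.map (fun s => s.toList.length)).drop k).sum := by
  unfold susum; rw [List.map_drop]

theorem susum_step (array : List String) (k : Nat) (h : k < array.length) :
    susum array k = (array.getD k "").toList.length + susum array (k + 1) := by
  have h' : k < (array.map (fun s => s.toList.length)).length := by simpa using h
  rw [susum_eq, susum_eq, List.drop_eq_getElem_cons h']
  simp [List.getD, List.getElem?_eq_getElem h]

theorem susum_succ_le (array : List String) (k : Nat) :
    susum array (k + 1) ≤ susum array k := by
  by_cases h : k < array.length
  · rw [susum_step array k h]; omega
  · unfold susum
    rw [List.drop_of_length_le (by omega), List.drop_of_length_le (by omega)]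

theorem susum_antitone (array : List String) {j k : Nat} (h : j ≤ k) :
    susum array k ≤ susum array j := by
  induction k with
  | zero =>
    have : j = 0 := by omega
    subst this; exact le_refl _
  | succ k ih =>
    rcases Nat.eq_or_lt_of_le h with rfl | h'
    · exact le_refl _
    · exact le_trans (susum_succ_le array k) (ih (by omega))

-- ---- A-side: reduce the loop to 'drop' of a backward index scan (selLoopAK) ----
def selLoopAK : List String → Nat → Nat → Nat
  | _, _, 0 => 0
  | array, tot, k + 1 =>
    if tot + (array.getD k "").toList.length ≤ 4000 then
      selLoopAK array (tot + (array.getD k "").toList.length) k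
    else k + 1

theorem selLoopAK_le (array : List String) (k : Nat) : ∀ tot, selLoopAK array tot k ≤ k := by
  induction k with
  | zero => intro tot; simp [selLoopAK]
  | succ k ih =>
    intro tot
    simp only [selLoopAK]
    split
    · exact le_trans (ih _) (Nat.le_succ k)
    · exact le_refl _

theorem selLoopAK_append (xs ys : List String) (k : Nat) (hk : k ≤ xs.length) :
    ∀ tot, selLoopAK (xs ++ ys) tot k = selLoopAK xs tot k := by
  induction k with
  | zero => intro tot; simp [selLoopAK]
  | succ k ih =>
    intro tot
    have hlt : k < xs.length := hk
    have hget : (xs ++ ys).getD k "" = xs.getD k "" := by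
      simp [List.getD, List.getElem?_append_left hlt]
    simp only [selLoopAK, hget]
    split
    · exact ih (le_of_lt hlt) _
    · rfl

theorem selLoopA_eq (r : List String) : ∀ (tot : Nat) (sel : List String),
    selLoopA r tot sel =
      r.reverse.drop (selLoopAK r.reverse tot r.length) ++ sel.reverse := by
  induction r with
  | nil => intro tot sel; simp [selLoopA, selLoopAK]
  | cons s r' ih =>
    intro tot sel
    have hlen : (s :: r').reverse = r'.reverse ++ [s] := by simp
    have hget : (r'.reverse ++ [s]).getD r'.length "" = s := by
      simp [List.getD]
    simp only [selLoopA, hlen, List.length_cons, selLoopAK, hget]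
    split
    · rename_i h
      rw [ih, selLoopAK_append r'.reverse [s] r'.length (by simp)]
      rw [List.drop_append_of_le_length
        (le_trans (selLoopAK_le _ _ _) (by simp))]
      simp
    · rw [List.drop_of_length_le (by simp)]
      simp

-- the backward index scan returns a k with susum k ≤ 4000 that is minimal for it
theorem selLoopAK_spec (array : List String) : ∀ k, k ≤ array.length →
    susum array k ≤ 4000 →
    susum array (selLoopAK array (susum array k) k) ≤ 4000 ∧
      (selLoopAK array (susum array k) k = 0 ∨
        4000 < susum array (selLoopAK array (susum array k) k - 1)) := by
  intro k
  induction k with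
  | zero => intro _ h0; exact ⟨by simpa [selLoopAK] using h0, Or.inl rfl⟩
  | succ k ih =>
    intro hk hle
    have hlt : k < array.length := by omega
    have hstep := susum_step array k hlt
    simp only [selLoopAK]
    split
    · rename_i h
      have : susum array (k + 1) + (array.getD k "").toList.length = susum array k := by omega
      rw [this]
      exact ih (by omega) (by omega)
    · rename_i h
      refine ⟨hle, Or.inr ?_⟩
      simp only [Nat.add_sub_cancel]
      omega

-- ---- B-side: the forward scan returns the minimal k with susum k ≤ 4000 ----
theorem fwdLoopB_spec (array : List String) :
    ∀ (rest : List String) (k : Nat), rest = array.drop k →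
    susum array (fwdLoopB ((susum array 0 : Int) - 4000) rest
        ((susum array 0 : Int) - susum array k) k) ≤ 4000 ∧
      ∀ j, k ≤ j → j < fwdLoopB ((susum array 0 : Int) - 4000) rest
        ((susum array 0 : Int) - susum array k) k → 4000 < susum array j := by
  intro rest
  induction rest with
  | nil =>
    intro k hk
    have hz : susum array k = 0 := by unfold susum; rw [← hk]; simp
    have hcond : ¬ ((susum array 0 : Int) - susum array k < (susum array 0 : Int) - 4000) := by
      rw [hz]; push_cast; omega
    simp only [fwdLoopB, if_neg hcond]
    exact ⟨by omega, fun j h1 h2 => by omega⟩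
  | cons s r ih =>
    intro k hk
    have hklen : k < array.length := by
      by_contra h
      rw [List.drop_of_length_le (by omega)] at hk
      simp at hk
    have hinj := hk.trans (List.drop_eq_getElem_cons hklen (l := array))
    injection hinj with hs hr
    have hsk : s = array.getD k "" := by
      rw [hs]; simp [List.getD, List.getElem?_eq_getElem hklen]
    have hstep := susum_step array k hklen
    simp only [fwdLoopB]
    split
    · rename_i hcond
      have hp : (susum array 0 : Int) - susum array k + s.toList.length
          = (susum array 0 : Int) - susum array (k + 1) := by
        rw [hsk]; omega
      rw [hp]
      obtain ⟨h1, h2⟩ := ih (k + 1) hr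
      refine ⟨h1, fun j hj1 hj2 => ?_⟩
      rcases Nat.eq_or_lt_of_le hj1 with rfl | hj'
      · -- j = k: the loop condition says susum k > 4000
        have hsle : (susum array k : Int) ≤ susum array 0 := by
          exact_mod_cast susum_antitone array (Nat.zero_le k)
        omega
      · exact h2 j (by omega) hj2
    · rename_i hcond
      have : susum array k ≤ 4000 := by
        have hsle : (susum array k : Int) ≤ susum array 0 := by
          exact_mod_cast susum_antitone array (Nat.zero_le k)
        omega
      exact ⟨this, fun j h1 h2 => by omega⟩

-- ===== VERDICT (by name: the statement is the Claim_ definition above) =====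
theorem select_strings_spec : Claim_equal_select_strings := by
  intro array _
  show select_strings array = select_strings_alt array
  unfold select_strings select_strings_alt
  rw [selLoopA_eq]
  simp only [List.reverse_reverse, List.length_reverse, List.append_nil, List.reverse_nil]
  -- both sides are array.drop of an index; show the indices are equal
  have hS0 : (array.map (fun s => s.toList.length)).sum = susum array 0 := by
    unfold susum; simp
  rw [hS0]
  have h0A : susum array array.length = 0 := by
    unfold susum; simp
  have h0B : (susum array 0 : Int) - susum array 0 = 0 := by omega
  have hA := selLoopAK_spec array array.length (le_refl _) (by omega)
  have hB := fwdLoopB_spec array array 0 (by simp)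
  rw [h0A] at hA
  rw [h0B] at hB
  set rA := selLoopAK array 0 array.length with hrA
  set rB := fwdLoopB ((susum array 0 : Int) - 4000) array 0 0 with hrB
  obtain ⟨hA1, hA2⟩ := hA
  obtain ⟨hB1, hB2⟩ := hB
  congr 1
  by_contra hne
  rcases Nat.lt_or_ge rA rB with h | h
  · exact absurd hA1 (by have := hB2 rA (Nat.zero_le _) h; omega)
  · have hlt : rB < rA := by omega
    rcases hA2 with h0 | hA2'
    · omega
    · have : susum array (rA - 1) ≤ susum array rB := susum_antitone array (by omega)
      omega
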